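-- pv_equiv track=rewrite | github.com/oscarsura/sudoku | visualizer.py | format_gridfile
-- ===== SOURCE A (Python) =====
-- dash_horizontal = u'\u2505'
--
-- dash_vertical = u'\u2507'
--
-- def format_gridfile(lines):
--     bar_horizontal = ''
--     for x in range(10):
--         bar_horizontal += ' ' + dash_horizontal
--     formatted_lines = []
--     header = '     '
--     header += 'Sudoku Solved'
--     formatted_lines.append(header)
--     row_count = 0
--     numlines = len(lines)
--     for x in range(numlines):
--         if lines[x].strip() in '': continue
--         if row_count % 3 == 0:
--             formatted_lines.append(bar_horizontal)
--         line = ''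
--         col_count = 0
--         for char in lines[x].strip():
--             if char == ' ': continue
--             if col_count % 3 == 0:
--                 line += dash_vertical
--             char = char if char not in ['_'] else ' '
--             line += ' ' + str(char)
--             col_count+=1
--         line += dash_vertical
--         formatted_lines.append(line)
--         row_count+=1
--     formatted_lines.append(bar_horizontal)
--     return formatted_lines
-- ===== SOURCE B (Python) =====
-- dash_horizontal = u'\u2505'
-- dash_vertical = u'\u2507'
--
-- def format_gridfile(lines):
--     bar_horizontal = (' ' + dash_horizontal) * 10
--     out = ['     Sudoku Solved']
--     filtered = [ln.strip() for ln in lines if ln.strip()]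
--     for i, stripped in enumerate(filtered):
--         if i % 3 == 0:
--             out.append(bar_horizontal)
--         cells = [' ' if c == '_' else c for c in stripped if c != ' ']
--         row = ''.join(dash_vertical + ''.join(' ' + c for c in cells[j:j+3])
--                       for j in range(0, len(cells), 3))
--         out.append(row + dash_vertical)
--     out.append(bar_horizontal)
--     return out
-- ===== Notes on version B (the rewrite author's own statement) =====
-- stated objective: simpler
-- what changed: B builds the cleaned cell list per line once and renders it as joined chunks of 3, driving the outer loop over the pre-filtered non-blank lines with enumerate, instead of A's character-by-character state machine with col_count/row_count counters and in-loop skips.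
import Mathlib
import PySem

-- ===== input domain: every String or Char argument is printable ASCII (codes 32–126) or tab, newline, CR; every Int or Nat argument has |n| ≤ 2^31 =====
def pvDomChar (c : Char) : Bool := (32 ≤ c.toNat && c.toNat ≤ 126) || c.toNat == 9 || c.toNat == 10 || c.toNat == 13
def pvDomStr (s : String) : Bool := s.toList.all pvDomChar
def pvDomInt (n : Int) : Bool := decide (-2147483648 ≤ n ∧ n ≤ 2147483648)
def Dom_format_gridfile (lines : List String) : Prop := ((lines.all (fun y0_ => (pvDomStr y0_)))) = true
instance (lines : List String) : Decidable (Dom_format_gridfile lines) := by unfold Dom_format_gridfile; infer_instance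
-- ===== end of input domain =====

-- B formats each non-blank line by cleaning its cells once and joining chunks of 3,
-- replacing A's per-character col_count/row_count state machine (objective: simpler).

-- ===== PORT A =====
def pvDashH : String := "\u2505"
def pvDashV : String := "\u2507"

-- bar_horizontal built by A's loop over range(10)
def pvBarA : String := (List.range 10).foldl (fun b _ => b ++ " " ++ pvDashH) ""

-- A's inner loop: for char in lines[x].strip(): …
def pvInnerA (cs : List Char) (colCount : Nat) (line : String) : String :=
  match cs with
  | [] => line
  | c :: rest =>
    if c = ' ' then pvInnerA rest colCount line
    else
      let line := if colCount % 3 == 0 then line ++ pvDashV else line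
      let c := if c = '_' then ' ' else c
      pvInnerA rest (colCount + 1) (line ++ " " ++ c.toString)

-- A's outer loop: for x in range(numlines): …  (traversed as the list of lines)
def pvOuterA (ls : List String) (rowCount : Nat) (acc : List String) : List String :=
  match ls with
  | [] => acc
  | l :: rest =>
    if PySem.Str.strip l = "" then pvOuterA rest rowCount acc  -- lines[x].strip() in '' ⇔ stripped == ''
    else
      let acc := if rowCount % 3 == 0 then acc ++ [pvBarA] else acc
      let line := pvInnerA (PySem.Str.strip l).toList 0 ""
      pvOuterA rest (rowCount + 1) (acc ++ [line ++ pvDashV])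

def format_gridfile (lines : List String) : List String :=
  pvOuterA lines 0 ["     " ++ "Sudoku Solved"] ++ [pvBarA]

-- ===== PORT B =====
-- bar_horizontal = (' ' + dash_horizontal) * 10
def pvBarB : String := String.join (List.replicate 10 (" " ++ pvDashH))

-- ''.join(' ' + c for c in chunk)
def pvCell (c : Char) : String := " " ++ c.toString

-- ''.join(dash_vertical + ''.join(' ' + c for c in cells[j:j+3]) for j in range(0, len(cells), 3))
def pvChunksB (cs : List Char) : String :=
  match cs with
  | [] => ""
  | [a] => pvDashV ++ pvCell a
  | [a, b] => pvDashV ++ pvCell a ++ pvCell b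
  | a :: b :: c :: rest => pvDashV ++ pvCell a ++ pvCell b ++ pvCell c ++ pvChunksB rest

-- cells = [' ' if c == '_' else c for c in stripped if c != ' ']; row = chunks + dash_vertical
def pvRowB (s : String) : String :=
  pvChunksB ((s.toList.filter (fun c => c ≠ ' ')).map (fun c => if c = '_' then ' ' else c)) ++ pvDashV

-- for i, stripped in enumerate(filtered): …
def pvStepB (p : Nat × List String) (s : String) : Nat × List String :=
  let acc := if p.1 % 3 == 0 then p.2 ++ [pvBarB] else p.2
  (p.1 + 1, acc ++ [pvRowB s])

def format_gridfile_alt (lines : List String) : List String :=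
  let filtered := (lines.map PySem.Str.strip).filter (fun s => s ≠ "")
  let rows := filtered.foldl pvStepB (0, [])
  ["     Sudoku Solved"] ++ rows.2 ++ [pvBarB]

-- ===== PRECONDITION & SPEC =====
def Spec_format_gridfile (lines : List String) (out : List String) : Prop := out = format_gridfile_alt lines
instance (lines : List String) (out : List String) : Decidable (Spec_format_gridfile lines out) := by unfold Spec_format_gridfile; infer_instance

-- ===== CLAIM (what is proved, stated in full; the proofs are below) =====
def Claim_equal_format_gridfile : Prop := ∀ (lines : List String), Dom_format_gridfile lines → Spec_format_gridfile lines (format_gridfile lines)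

-- ===== LEMMAS AND PROOFS =====

theorem pvBar_eq : pvBarA = pvBarB := by decide

-- A's inner loop with the space-skip fused out: it equals the same loop over the pre-filtered, pre-mapped cell list
def pvStep2 (p : Nat × String) (c : Char) : Nat × String :=
  (p.1 + 1, (if p.1 % 3 == 0 then p.2 ++ pvDashV else p.2) ++ " " ++ c.toString)

theorem pvInnerA_filter (cs : List Char) : ∀ (col : Nat) (line : String),
    pvInnerA cs col line =
      (((cs.filter (fun c => c ≠ ' ')).map (fun c => if c = '_' then ' ' else c)).foldl
        pvStep2 (col, line)).2 := by
  induction cs with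
  | nil => intro col line; simp [pvInnerA]
  | cons c rest ih =>
    intro col line
    by_cases hc : c = ' '
    · simp [pvInnerA, hc, ih]
    · simp [pvInnerA, hc, ih, pvStep2]

-- the fused fold, started at a multiple of 3, renders exactly B's chunks-of-3 string
theorem pvFold_eq_chunks (ds : List Char) : ∀ (col : Nat) (line : String), col % 3 = 0 →
    (ds.foldl pvStep2 (col, line)).2 = line ++ pvChunksB ds := by
  induction ds using pvChunksB.induct with
  | case1 => intro col line h; simp [pvChunksB]
  | case2 a =>
    intro col line h
    simp [pvChunksB, pvCell, pvStep2, h]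
    simp only [String.push_eq_append, String.append_assoc]
  | case3 a b =>
    intro col line h
    have h1 : (col + 1) % 3 = 1 := by omega
    simp [pvChunksB, pvCell, pvStep2, h, h1]
    simp only [String.push_eq_append, String.append_assoc]
  | case4 a b c rest ih =>
    intro col line h
    have h1 : (col + 1) % 3 = 1 := by omega
    have h2 : (col + 1 + 1) % 3 = 2 := by omega
    have h3 : (col + 1 + 1 + 1) % 3 = 0 := by omega
    simp only [List.foldl_cons]
    rw [show pvStep2 (pvStep2 (pvStep2 (col, line) a) b) c = (col + 1 + 1 + 1,
        line ++ pvDashV ++ " " ++ a.toString ++ " " ++ b.toString ++ " " ++ c.toString) by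
      simp [pvStep2, h, h1, h2]]
    rw [ih _ _ h3]
    simp [pvChunksB, pvCell]
    simp only [String.push_eq_append, String.append_assoc]

theorem pvInnerA_eq_rowB (s : String) : pvInnerA s.toList 0 "" ++ pvDashV = pvRowB s := by
  rw [pvInnerA_filter, pvRowB, pvFold_eq_chunks _ 0 "" rfl]
  simp

-- A's outer loop equals B's fold over the filtered stripped lines, for any starting row count and accumulator
theorem pvOuterA_eq_fold (ls : List String) : ∀ (row : Nat) (acc : List String),
    pvOuterA ls row acc =
      (((ls.map PySem.Str.strip).filter (fun s => s ≠ "")).foldl pvStepB (row, acc)).2 := by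
  induction ls with
  | nil => intro row acc; simp [pvOuterA]
  | cons l rest ih =>
    intro row acc
    by_cases h : PySem.Str.strip l = ""
    · simp [pvOuterA, h, ih]
    · simp only [pvOuterA]
      rw [if_neg h, pvInnerA_eq_rowB, ih, pvBar_eq]
      simp only [List.map_cons, List.filter_cons]
      rw [if_pos (show decide (PySem.Str.strip l ≠ "") = true by simp [h]), List.foldl_cons]
      simp [pvStepB]

-- B's fold step only ever appends to the list component
theorem pvStepB_shift (fs : List String) : ∀ (row : Nat) (a0 a : List String),
    (fs.foldl pvStepB (row, a0 ++ a)).2 = a0 ++ (fs.foldl pvStepB (row, a)).2 := by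
  induction fs with
  | nil => intro row a0 a; simp
  | cons f rest ih =>
    intro row a0 a
    simp only [List.foldl_cons, pvStepB]
    by_cases h : row % 3 = 0 <;> simp [h, List.append_assoc, ih]

-- ===== VERDICT (by name: the statement is the Claim_ definition above) =====
theorem format_gridfile_spec : Claim_equal_format_gridfile := by
  intro lines _
  unfold Spec_format_gridfile format_gridfile format_gridfile_alt
  rw [pvOuterA_eq_fold]
  have h0 : ["     " ++ "Sudoku Solved"] = ["     Sudoku Solved"] ++ ([] : List String) := by rfl
  rw [h0, pvStepB_shift, pvBar_eq]
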